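-- pv_equiv track=rewrite | github.com/LeChummpy/homework | 18_1_2021.py | Notenspiegel
-- ===== SOURCE A (Python) =====
-- def Notenspiegel(noten):
--     #Rückgabe: Liste aus Tuplen, wobei: Tuple[0]--> Note und Tuple[1]--> Anzahl
--
--     notenspiegel=[0,0,0,0,0,0]
--     for i in noten:
--         if i==1:
--             notenspiegel[0]+=1
--         elif i==2:
--             notenspiegel[1]+=1
--         elif i==3:
--             notenspiegel[2]+=1
--         elif i==4:
--             notenspiegel[3]+=1
--         elif i==5:
--             notenspiegel[4]+=1
--         elif i==6:
--             notenspiegel[5]+=1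
--
--     ergebnis=[]
--     for i in range(len(notenspiegel)):
--         ergebnis.append((i+1, notenspiegel[i]))
--     return ergebnis
-- ===== SOURCE B (Python) =====
-- def Notenspiegel(noten):
--     s = sorted(noten)
--     ergebnis = []
--     i = 0
--     for g in range(1, 7):
--         while i < len(s) and s[i] < g:
--             i += 1
--         j = i
--         while j < len(s) and s[j] == g:
--             j += 1
--         ergebnis.append((g, j - i))
--         i = j
--     return ergebnis
-- ===== Notes on version B (the rewrite author's own statement) =====
-- stated objective: alternative
-- what changed: B sorts the grades once and walks the sorted order with two index pointers, reading each grade's count off as the length of its run, instead of A's per-element if/elif dispatch into a six-slot tally array and the index loop reading the table back.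
import Mathlib
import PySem

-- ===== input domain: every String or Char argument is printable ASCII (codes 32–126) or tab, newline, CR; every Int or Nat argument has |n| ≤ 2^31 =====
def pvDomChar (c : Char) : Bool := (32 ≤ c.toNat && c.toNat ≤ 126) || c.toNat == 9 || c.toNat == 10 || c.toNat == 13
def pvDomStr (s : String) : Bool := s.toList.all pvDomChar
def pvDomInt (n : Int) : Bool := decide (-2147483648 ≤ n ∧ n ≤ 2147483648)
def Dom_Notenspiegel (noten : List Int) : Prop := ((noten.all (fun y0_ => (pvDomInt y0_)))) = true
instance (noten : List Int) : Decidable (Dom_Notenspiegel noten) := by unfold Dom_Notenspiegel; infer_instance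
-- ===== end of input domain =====

-- B sorts the list once and walks the sorted order with two index pointers, reading each
-- grade's count off as the length of its run (objective: alternative — a different algorithm).

-- ===== PORT A =====
-- the if/elif chain of A's first loop, updating the 6-slot tally list in place
def NotenspiegelStep (ns : List Int) (i : Int) : List Int :=
  if i == 1 then ns.set 0 (ns.getD 0 0 + 1)
  else if i == 2 then ns.set 1 (ns.getD 1 0 + 1)
  else if i == 3 then ns.set 2 (ns.getD 2 0 + 1)
  else if i == 4 then ns.set 3 (ns.getD 3 0 + 1)
  else if i == 5 then ns.set 4 (ns.getD 4 0 + 1)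
  else if i == 6 then ns.set 5 (ns.getD 5 0 + 1)
  else ns

def Notenspiegel (noten : List Int) : List (Int × Int) :=
  let notenspiegel := noten.foldl NotenspiegelStep [0, 0, 0, 0, 0, 0]
  (PySem.List.pyRange 0 (notenspiegel.length : Int) 1).foldl
    (fun erg i => erg ++ [(i + 1, PySem.List.pyGetD notenspiegel i 0)]) []

-- ===== PORT B =====
-- Source B's first while loop: advance i while i < len(s) and s[i] < g
def NotenSkipIdx (s : List Int) (g : Int) (i : Nat) : Nat :=
  if i < s.length then
    if s.getD i 0 < g then NotenSkipIdx s g (i + 1) else i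
  else i
termination_by s.length - i

-- Source B's second while loop: advance j while j < len(s) and s[j] == g
def NotenEqIdx (s : List Int) (g : Int) (j : Nat) : Nat :=
  if j < s.length then
    if s.getD j 0 == g then NotenEqIdx s g (j + 1) else j
  else j
termination_by s.length - j

def Notenspiegel_alt (noten : List Int) : List (Int × Int) :=
  let s := PySem.List.sorted noten (fun x => x) false
  ((PySem.List.pyRange 1 7 1).foldl
    (fun (st : Nat × List (Int × Int)) g =>
      let i := NotenSkipIdx s g st.1
      let j := NotenEqIdx s g i
      (j, st.2 ++ [(g, (j : Int) - (i : Int))]))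
    (0, [])).2

-- ===== PRECONDITION & SPEC =====
def Spec_Notenspiegel (noten : List Int) (out : List (Int × Int)) : Prop := out = Notenspiegel_alt noten
instance (noten : List Int) (out : List (Int × Int)) : Decidable (Spec_Notenspiegel noten out) := by unfold Spec_Notenspiegel; infer_instance

-- ===== CLAIM (what is proved, stated in full; the proofs are below) =====
def Claim_equal_Notenspiegel : Prop := ∀ (noten : List Int), Dom_Notenspiegel noten → Spec_Notenspiegel noten (Notenspiegel noten)

-- ===== LEMMAS AND PROOFS =====

-- A's tally fold computes, slot by slot, the count of each grade added to the starting values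
lemma foldl_NotenspiegelStep (xs : List Int) (a b c d e f : Int) :
    xs.foldl NotenspiegelStep [a, b, c, d, e, f] =
      [a + xs.count 1, b + xs.count 2, c + xs.count 3,
       d + xs.count 4, e + xs.count 5, f + xs.count 6] := by
  induction xs generalizing a b c d e f with
  | nil => simp
  | cons x xs ih =>
    simp only [List.foldl_cons, NotenspiegelStep]
    by_cases h1 : x = 1
    · subst h1; simp [ih]; ring
    · by_cases h2 : x = 2
      · subst h2; simp [ih]; ring
      · by_cases h3 : x = 3
        · subst h3; simp [ih]; ring
        · by_cases h4 : x = 4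
          · subst h4; simp [ih]; ring
          · by_cases h5 : x = 5
            · subst h5; simp [ih]; ring
            · by_cases h6 : x = 6
              · subst h6; simp [ih]; ring
              · simp [h1, h2, h3, h4, h5, h6, ih]

-- proof-side list views of the two index loops
def NotenSkipLt (g : Int) : List Int → List Int
  | [] => []
  | x :: xs => if x < g then NotenSkipLt g xs else x :: xs

def NotenTakeEq (g : Int) : List Int → Nat
  | [] => 0
  | x :: xs => if x == g then NotenTakeEq g xs + 1 else 0

lemma NotenSkipIdx_bounds (s : List Int) (g : Int) (i : Nat) :
    i ≤ NotenSkipIdx s g i ∧ NotenSkipIdx s g i ≤ max i s.length := by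
  fun_induction NotenSkipIdx s g i with
  | case1 i hi hlt ih => omega
  | case2 i hi hlt => omega
  | case3 i hi => omega

lemma NotenSkipIdx_drop (s : List Int) (g : Int) (i : Nat) (hle : i ≤ s.length) :
    s.drop (NotenSkipIdx s g i) = NotenSkipLt g (s.drop i) := by
  fun_induction NotenSkipIdx s g i with
  | case1 i hi hlt ih =>
    rw [ih (by omega), List.drop_eq_getElem_cons hi]
    simp only [NotenSkipLt]
    rw [if_pos (by rwa [← List.getD_eq_getElem s 0 hi])]
  | case2 i hi hlt =>
    rw [List.drop_eq_getElem_cons hi]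
    conv_rhs => simp only [NotenSkipLt]
    rw [if_neg (by rwa [← List.getD_eq_getElem s 0 hi]), ← List.drop_eq_getElem_cons hi]
  | case3 i hi =>
    have h0 : s.drop i = [] := List.drop_eq_nil_of_le (by omega)
    simp [h0, NotenSkipLt]

lemma NotenEqIdx_spec (s : List Int) (g : Int) (j : Nat) (hle : j ≤ s.length) :
    NotenEqIdx s g j = j + NotenTakeEq g (s.drop j) := by
  fun_induction NotenEqIdx s g j with
  | case1 j hj heq ih =>
    rw [ih (by omega), List.drop_eq_getElem_cons hj]
    simp only [NotenTakeEq]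
    rw [if_pos (by rwa [← List.getD_eq_getElem s 0 hj])]
    omega
  | case2 j hj heq =>
    rw [List.drop_eq_getElem_cons hj]
    simp only [NotenTakeEq]
    rw [if_neg (by rwa [← List.getD_eq_getElem s 0 hj])]
    omega
  | case3 j hj =>
    have h0 : s.drop j = [] := List.drop_eq_nil_of_le (by omega)
    simp [h0, NotenTakeEq]

lemma NotenEqIdx_drop (s : List Int) (g : Int) (j : Nat) (hle : j ≤ s.length) :
    s.drop (NotenEqIdx s g j) = (s.drop j).drop (NotenTakeEq g (s.drop j)) := by
  rw [NotenEqIdx_spec s g j hle, List.drop_drop]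

lemma NotenEqIdx_le (s : List Int) (g : Int) (j : Nat) (hle : j ≤ s.length) :
    NotenEqIdx s g j ≤ s.length := by
  rw [NotenEqIdx_spec s g j hle]
  have : NotenTakeEq g (s.drop j) ≤ (s.drop j).length := by
    generalize s.drop j = r
    induction r with
    | nil => simp [NotenTakeEq]
    | cons x xs ih =>
      by_cases h : x = g
      · simp [NotenTakeEq, h]; omega
      · simp [NotenTakeEq, h]
  simp at this
  omega

-- properties of the list views on a sorted tail
lemma count_NotenSkipLt (g h : Int) (r : List Int) (hgh : g ≤ h) :
    (NotenSkipLt g r).count h = r.count h := by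
  induction r with
  | nil => rfl
  | cons x xs ih =>
    by_cases hx : x < g
    · have hxh : x ≠ h := by omega
      simp [NotenSkipLt, hx, ih, hxh]
    · simp [NotenSkipLt, hx]

lemma pairwise_NotenSkipLt (g : Int) (r : List Int) (hs : r.Pairwise (· ≤ ·)) :
    (NotenSkipLt g r).Pairwise (· ≤ ·) := by
  induction r with
  | nil => exact hs
  | cons x xs ih =>
    rcases List.pairwise_cons.mp hs with ⟨hx, hxs⟩
    by_cases hlt : x < g
    · simpa [NotenSkipLt, hlt] using ih hxs
    · simpa [NotenSkipLt, hlt] using hs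

lemma ge_of_mem_NotenSkipLt (g : Int) (r : List Int) (hs : r.Pairwise (· ≤ ·)) :
    ∀ y ∈ NotenSkipLt g r, g ≤ y := by
  induction r with
  | nil => intro y hy; simp [NotenSkipLt] at hy
  | cons x xs ih =>
    rcases List.pairwise_cons.mp hs with ⟨hx, hxs⟩
    by_cases hlt : x < g
    · simpa [NotenSkipLt, hlt] using ih hxs
    · intro y hy
      simp [NotenSkipLt, hlt] at hy
      rcases hy with rfl | hy
      · omega
      · exact le_trans (by omega) (hx y hy)

lemma NotenTakeEq_spec (g : Int) (r : List Int) (hr : r.Pairwise (· ≤ ·))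
    (hge : ∀ y ∈ r, g ≤ y) :
    NotenTakeEq g r = r.count g ∧
    (r.drop (NotenTakeEq g r)).Pairwise (· ≤ ·) ∧
    (∀ h : Int, g < h → (r.drop (NotenTakeEq g r)).count h = r.count h) := by
  induction r with
  | nil => exact ⟨rfl, List.Pairwise.nil, fun _ _ => rfl⟩
  | cons x xs ih =>
    rcases List.pairwise_cons.mp hr with ⟨hx, hxs⟩
    by_cases hxg : x = g
    · subst hxg
      obtain ⟨h1, h2, h3⟩ := ih hxs hx
      refine ⟨?_, ?_, ?_⟩
      · simp [NotenTakeEq, h1]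
      · simpa [NotenTakeEq] using h2
      · intro h hh
        have hxh : x ≠ h := by omega
        simpa [NotenTakeEq, List.count_cons, hxh] using h3 h hh
    · have hxgt : g < x := lt_of_le_of_ne (hge x (by simp)) (Ne.symm hxg)
      have hcount0 : (x :: xs).count g = 0 := by
        refine List.count_eq_zero.mpr ?_
        intro hmem
        rcases List.mem_cons.mp hmem with h | h
        · omega
        · exact absurd (hx g h) (by omega)
      refine ⟨?_, ?_, ?_⟩
      · simp [NotenTakeEq, hxg, hcount0]
      · simpa [NotenTakeEq, hxg] using hr
      · intro h _; simp [NotenTakeEq, hxg]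

-- one grade step of B's fold, phrased on the index state via the sorted tail s.drop i
lemma Noten_step_spec (s : List Int) (g : Int) (i : Nat) (c : Int → Nat)
    (hile : i ≤ s.length)
    (hrest : (s.drop i).Pairwise (· ≤ ·))
    (hc : ∀ h : Int, g ≤ h → (s.drop i).count h = c h) :
    let i' := NotenSkipIdx s g i
    let j := NotenEqIdx s g i'
    (j : Int) - (i' : Int) = (c g : Int) ∧ j ≤ s.length ∧
    (s.drop j).Pairwise (· ≤ ·) ∧ (∀ h : Int, g + 1 ≤ h → (s.drop j).count h = c h) := by
  intro i' j
  have hi'le : i' ≤ s.length := by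
    have := NotenSkipIdx_bounds s g i
    omega
  have hdropi' : s.drop i' = NotenSkipLt g (s.drop i) := NotenSkipIdx_drop s g i hile
  have hpair' : (s.drop i').Pairwise (· ≤ ·) := by
    rw [hdropi']; exact pairwise_NotenSkipLt g _ hrest
  have hge' : ∀ y ∈ s.drop i', g ≤ y := by
    rw [hdropi']; exact ge_of_mem_NotenSkipLt g _ hrest
  obtain ⟨t1, t2, t3⟩ := NotenTakeEq_spec g (s.drop i') hpair' hge'
  have hj : j = i' + NotenTakeEq g (s.drop i') := NotenEqIdx_spec s g i' hi'le
  have hdropj : s.drop j = (s.drop i').drop (NotenTakeEq g (s.drop i')) :=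
    NotenEqIdx_drop s g i' hi'le
  refine ⟨?_, NotenEqIdx_le s g i' hi'le, ?_, ?_⟩
  · rw [hj, t1, hdropi', count_NotenSkipLt g g _ le_rfl, hc g le_rfl]
    push_cast
    ring
  · rw [hdropj]; exact t2
  · intro h hh
    rw [hdropj, t3 h (by omega), hdropi', count_NotenSkipLt g h _ (by omega)]
    exact hc h (by omega)

-- ===== VERDICT (by name: the statement is the Claim_ definition above) =====
theorem Notenspiegel_spec : Claim_equal_Notenspiegel := by
  intro noten _
  unfold Spec_Notenspiegel
  have hA : Notenspiegel noten =
      [(1, (noten.count 1 : Int)), (2, (noten.count 2 : Int)), (3, (noten.count 3 : Int)),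
       (4, (noten.count 4 : Int)), (5, (noten.count 5 : Int)), (6, (noten.count 6 : Int))] := by
    unfold Notenspiegel
    rw [foldl_NotenspiegelStep]
    simp [PySem.List.pyRange, PySem.List.pyGetD, PySem.List.pyIdx?, PySem.List.pyGet?,
      List.range_succ]
  set s : List Int := PySem.List.sorted noten (fun x => x) false with hs
  have hsort : s.Pairwise (· ≤ ·) := by
    simpa using PySem.List.sorted_pairwise (xs := noten) (key := fun x => x)
  have hcount0 : ∀ h : Int, (1 : Int) ≤ h → (s.drop 0).count h = noten.count h := by
    intro h _
    simpa using (PySem.List.sorted_perm (xs := noten) (key := fun x => x) (rev := false)).count_eq h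
  have run : ∀ (g : Int) (i : Nat), i ≤ s.length → (s.drop i).Pairwise (· ≤ ·) →
      (∀ h : Int, g ≤ h → (s.drop i).count h = noten.count h) →
      ((NotenEqIdx s g (NotenSkipIdx s g i) : Int) - (NotenSkipIdx s g i : Int)
        = (noten.count g : Int) ∧
       NotenEqIdx s g (NotenSkipIdx s g i) ≤ s.length ∧
       (s.drop (NotenEqIdx s g (NotenSkipIdx s g i))).Pairwise (· ≤ ·) ∧
       (∀ h : Int, g + 1 ≤ h →
         (s.drop (NotenEqIdx s g (NotenSkipIdx s g i))).count h = noten.count h)) :=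
    fun g i h0 h1 h2 => Noten_step_spec s g i noten.count h0 h1 h2
  have hd0 : (s.drop 0).Pairwise (· ≤ ·) := by simpa using hsort
  obtain ⟨e1, l1, p1, c1⟩ := run 1 0 (by omega) hd0 hcount0
  obtain ⟨e2, l2, p2, c2⟩ := run 2 _ l1 p1 c1
  obtain ⟨e3, l3, p3, c3⟩ := run 3 _ l2 p2 c2
  obtain ⟨e4, l4, p4, c4⟩ := run 4 _ l3 p3 c3
  obtain ⟨e5, l5, p5, c5⟩ := run 5 _ l4 p4 c4
  obtain ⟨e6, l6, p6, c6⟩ := run 6 _ l5 p5 c5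
  have hB : Notenspiegel_alt noten =
      [(1, (noten.count 1 : Int)), (2, (noten.count 2 : Int)), (3, (noten.count 3 : Int)),
       (4, (noten.count 4 : Int)), (5, (noten.count 5 : Int)), (6, (noten.count 6 : Int))] := by
    unfold Notenspiegel_alt
    have hrange : PySem.List.pyRange 1 7 1 = [1, 2, 3, 4, 5, 6] := by decide
    rw [hrange]
    simp only [List.foldl_cons, List.foldl_nil, ← hs]
    simp only [e1, e2, e3, e4, e5, e6]
    simp
  rw [hA, hB]
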